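-- pv_equiv track=rewrite | github.com/mitsuo0114/competitive_programming | python/atcoder/Beginner114/D.py | solve
-- ===== SOURCE A (Python) =====
-- from collections import Counter
-- from itertools import combinations
--
-- def prime_factors(n):
--     c = Counter()
--     while n > 1:
--         for i in range(2, n + 1):
--             if n % i == 0:
--                 c.update([i])
--                 n //= i
--                 break
--     return c
--
-- def factrials(n):
--     c = {}
--     for i in range(2, n + 1):
--         d = prime_factors(i)
--         for k, v in d.items():
--             if k in c:
--                 c[k] += v
--             else:
--                 c[k] = v
--     return c
--
-- def solve(N):
--     facts = factrials(N)
--     over2 = [k for k, v in facts.items() if v >= 2]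
--     over4 = [k for k, v in facts.items() if v >= 4]
--     over14 = [k for k, v in facts.items() if v >= 14]
--     over24 = [k for k, v in facts.items() if v >= 24]
--     over74 = [k for k, v in facts.items() if v >= 74]
--
--     sum = 0
--     # 4 - 4 - 2
--     sum += len([(d, d4) for d in over2 for d4 in combinations(over4, 2) if d not in d4])
--     # 4 - 14
--     sum += len([(d, d4) for d in over14 for d4 in over4 if d != d4])
--     # 2 - 24
--     sum += len([(d, d2) for d in over24 for d2 in over2 if d != d2])
--     # 74
--     sum += len(over74)
--
--     return sum
-- ===== SOURCE B (Python) =====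
-- def solve(N):
--     # Count primes p <= N whose exponent in N! (Legendre's formula) reaches each threshold,
--     # then combine the counts arithmetically.
--     a2 = a4 = a14 = a24 = a74 = 0
--     for p in range(2, N + 1):
--         # trial division up to sqrt(p)
--         q = 2
--         composite = False
--         while q * q <= p:
--             if p % q == 0:
--                 composite = True
--                 break
--             q += 1
--         if composite:
--             continue
--         e = 0
--         q = p
--         while q <= N:
--             e += N // q
--             q *= p
--         if e >= 2:
--             a2 += 1
--         if e >= 4:
--             a4 += 1
--         if e >= 14:
--             a14 += 1
--         if e >= 24:
--             a24 += 1
--         if e >= 74: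
--             a74 += 1
--     return a4 * (a4 - 1) // 2 * (a2 - 2) + a14 * (a4 - 1) + a24 * (a2 - 1) + a74
-- ===== Notes on version B (the rewrite author's own statement) =====
-- stated objective: faster
-- what changed: A factors every i in 2..N by repeated smallest-divisor search, merges the factorizations into a dict, and counts the triples with nested comprehensions over itertools.combinations; B computes each prime's exponent in N! directly by Legendre's formula (primality by trial division up to sqrt p) and combines the five threshold counts with a closed-form arithmetic expression.
import Mathlib
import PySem

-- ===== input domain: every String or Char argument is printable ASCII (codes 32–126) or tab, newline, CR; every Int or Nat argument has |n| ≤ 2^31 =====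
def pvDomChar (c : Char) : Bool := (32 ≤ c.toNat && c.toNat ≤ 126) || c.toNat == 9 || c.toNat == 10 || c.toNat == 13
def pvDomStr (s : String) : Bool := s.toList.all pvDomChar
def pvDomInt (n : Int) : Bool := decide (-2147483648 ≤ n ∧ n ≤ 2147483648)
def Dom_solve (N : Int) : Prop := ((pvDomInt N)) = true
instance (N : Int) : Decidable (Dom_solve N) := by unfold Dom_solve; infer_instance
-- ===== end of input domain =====

-- B replaces A's per-integer smallest-divisor factorization and nested comprehension counting
-- by Legendre's formula per prime and a closed-form count (objective: faster).


-- ===== PORT A =====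
-- inner 'for i in range(2, n+1): if n % i == 0: … break' of prime_factors: first divisor found
def pfFind (n : Int) : Option Int :=
  (PySem.List.pyRange 2 (n + 1) 1).find? (fun i => PySem.Int.mod n i == 0)

-- the 'while n > 1' loop of prime_factors, carrying the Counter c
def pfLoop (n : Int) (c : PySem.Dict Int Int) : PySem.Dict Int Int :=
  if 1 < n then
    match hf : pfFind n with
    | some i => pfLoop (PySem.Int.floordiv n i) (c.modify i 0 (· + 1))
    | none => c
  else c
termination_by n.toNat
decreasing_by
  have hmem := List.mem_of_find?_eq_some hf
  have hp := List.find?_some hf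
  rw [PySem.List.mem_pyRange_one] at hmem
  have h2 : (2:Int) ≤ i := hmem.1
  have heq : PySem.Int.floordiv n i = n / i := PySem.Int.floordiv_eq_ediv_of_pos (by omega)
  rw [heq]
  have h0 : 0 < n / i := Int.ediv_pos_of_pos_of_dvd (by omega) (by omega)
    ((PySem.Int.mod_eq_zero_iff_dvd n i).mp (by simpa using hp))
  have hq0 : 0 ≤ n / i := by omega
  have hr := Int.emod_nonneg n (show i ≠ 0 by omega)
  have hdm := Int.mul_ediv_add_emod n i
  have hmul : 2 * (n / i) ≤ i * (n / i) := mul_le_mul_of_nonneg_right h2 hq0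
  omega

def primeFactors (n : Int) : PySem.Dict Int Int := pfLoop n PySem.Dict.empty

def factrials (n : Int) : PySem.Dict Int Int :=
  (PySem.List.pyRange 2 (n + 1) 1).foldl (fun c i =>
    (primeFactors i).items.foldl (fun c kv =>
      if c.contains kv.1 then c.modify kv.1 0 (· + kv.2) else c.insert kv.1 kv.2) c)
    PySem.Dict.empty

def solve (N : Int) : Int :=
  let facts := factrials N
  let over2 := (facts.items.filter (fun kv => 2 ≤ kv.2)).map (·.1)
  let over4 := (facts.items.filter (fun kv => 4 ≤ kv.2)).map (·.1)
  let over14 := (facts.items.filter (fun kv => 14 ≤ kv.2)).map (·.1)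
  let over24 := (facts.items.filter (fun kv => 24 ≤ kv.2)).map (·.1)
  let over74 := (facts.items.filter (fun kv => 74 ≤ kv.2)).map (·.1)
  let s1 := (over2.flatMap (fun d =>
      ((PySem.List.combinations over4 2).filter (fun d4 => !d4.contains d)).map
        (fun d4 => (d, d4)))).length
  let s2 := (over14.flatMap (fun d =>
      (over4.filter (fun d4 => d ≠ d4)).map (fun d4 => (d, d4)))).length
  let s3 := (over24.flatMap (fun d =>
      (over2.filter (fun d2 => d ≠ d2)).map (fun d2 => (d, d2)))).length
  ((s1 : Int) + s2 + s3 + over74.length)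

-- ===== PORT B =====
-- 'while q * q <= p' trial-division loop of Source B (the fuel bounds the iteration count)
def trialLoop : Nat → Int → Int → Bool
  | 0, _, _ => false
  | fuel + 1, q, p =>
    if q * q ≤ p then
      if PySem.Int.mod p q == 0 then true else trialLoop fuel (q + 1) p
    else false

-- 'while q <= N: e += N // q; q *= p' Legendre loop of Source B
def legLoop : Nat → Int → Int → Int → Int → Int
  | 0, _, _, _, e => e
  | fuel + 1, p, n, q, e =>
    if q ≤ n then legLoop fuel p n (q * p) (e + PySem.Int.floordiv n q) else e

def solve_alt (N : Int) : Int :=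
  let st := (PySem.List.pyRange 2 (N + 1) 1).foldl (fun st p =>
    if trialLoop p.toNat 2 p then st
    else
      let e := legLoop N.toNat p N p 0
      (st.1 + (if 2 ≤ e then 1 else 0),
       st.2.1 + (if 4 ≤ e then 1 else 0),
       st.2.2.1 + (if 14 ≤ e then 1 else 0),
       st.2.2.2.1 + (if 24 ≤ e then 1 else 0),
       st.2.2.2.2 + (if 74 ≤ e then 1 else 0)))
    ((0 : Int), (0 : Int), (0 : Int), (0 : Int), (0 : Int))
  let a2 := st.1
  let a4 := st.2.1
  let a14 := st.2.2.1
  let a24 := st.2.2.2.1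
  let a74 := st.2.2.2.2
  PySem.Int.floordiv (a4 * (a4 - 1)) 2 * (a2 - 2) + a14 * (a4 - 1) + a24 * (a2 - 1) + a74

-- ===== PRECONDITION & SPEC =====
def Spec_solve (N : Int) (out : Int) : Prop := out = solve_alt N
instance (N : Int) (out : Int) : Decidable (Spec_solve N out) := by unfold Spec_solve; infer_instance

-- ===== CLAIM (what is proved, stated in full; the proofs are below) =====
def Claim_equal_solve : Prop := ∀ (N : Int), Dom_solve N → Spec_solve N (solve N)

-- ===== LEMMAS AND PROOFS =====

-- [2, 3, …, M] as a list of naturals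
def ints2 (M : Nat) : List Nat := List.range' 2 (M - 1)

-- the exponent of p in M! (what both programs compute per prime)
def Fv (M p : Nat) : Nat := (Nat.factorial M).factorization p

-- number of primes in [2..M] whose exponent in M! is at least t
def ct (M t : Nat) : Nat := (ints2 M).countP (fun p => decide (Nat.Prime p) && decide (t ≤ Fv M p))

theorem mem_ints2 {M i : Nat} : i ∈ ints2 M ↔ 2 ≤ i ∧ i ≤ M := by
  rw [ints2, List.mem_range'_1]
  omega

theorem nodup_ints2 (M : Nat) : (ints2 M).Nodup := List.nodup_range' 1

theorem ints2_succ {M : Nat} (h : 1 ≤ M) : ints2 (M + 1) = ints2 M ++ [M + 1] := by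
  have h1 : M + 1 - 1 = (M - 1) + 1 := by omega
  rw [ints2, h1, List.range'_1_concat, ints2]
  congr 2
  omega

theorem pyRange_two_cast (N : Int) :
    PySem.List.pyRange 2 (N + 1) 1 = (ints2 N.toNat).map (fun (i : Nat) => (i : Int)) := by
  have h : (N + 1 - 2).toNat = N.toNat - 1 := by omega
  simp only [PySem.List.pyRange_one, ints2, List.range'_eq_map_range, List.map_map, h]
  apply List.map_congr_left
  intro a _
  simp only [Function.comp_apply]
  push_cast
  ring

theorem find?_pyRange_eq_some (p : Int → Bool) (a b x : Int) (hax : a ≤ x) (hxb : x < b)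
    (hpx : p x = true) (hlt : ∀ y, a ≤ y → y < x → p y = false) :
    (PySem.List.pyRange a b 1).find? p = some x := by
  induction hn : (x - a).toNat generalizing a with
  | zero =>
    have hax2 : a = x := by omega
    subst hax2
    rw [PySem.List.pyRange_one_cons (by omega), List.find?_cons, hpx]
  | succ n ih =>
    have hax2 : a < x := by omega
    rw [PySem.List.pyRange_one_cons (by omega), List.find?_cons, hlt a le_rfl hax2]
    exact ih (a + 1) (by omega) (fun y hy1 hy2 => hlt y (by omega) hy2) (by omega)

theorem pfFind_eq (n : Nat) (h : 2 ≤ n) : pfFind (n : Int) = some ((n.minFac : Nat) : Int) := by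
  have hp : (n.minFac).Prime := Nat.minFac_prime (by omega)
  apply find?_pyRange_eq_some
  · exact_mod_cast hp.two_le
  · have : n.minFac ≤ n := Nat.minFac_le (by omega)
    exact_mod_cast by omega
  · rw [PySem.Int.mod_natCast]
    obtain ⟨k, hk⟩ := Nat.minFac_dvd n
    have h0 : n % n.minFac = 0 := by nth_rewrite 1 [hk]; exact Nat.mul_mod_right _ _
    simp [h0]
  · intro y hy1 hy2
    have hy0 : 0 ≤ y := by omega
    obtain ⟨m, rfl⟩ : ∃ m : Nat, y = (m : Int) := ⟨y.toNat, (Int.toNat_of_nonneg hy0).symm⟩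
    rw [PySem.Int.mod_natCast]
    have hm2 : 2 ≤ m := by exact_mod_cast hy1
    have hmlt : m < n.minFac := by exact_mod_cast hy2
    have : ¬ m ∣ n := fun hdvd => absurd (Nat.minFac_le_of_dvd hm2 hdvd) (by omega)
    have hne : n % m ≠ 0 := fun h0 => this (Nat.dvd_of_mod_eq_zero h0)
    simp only [beq_eq_false_iff_ne, ne_eq]
    exact_mod_cast hne

theorem pfLoop_eq (n : Nat) (h : 1 ≤ n) : ∀ c, pfLoop (n : Int) c =
    (n.primeFactorsList.map (fun (p : Nat) => (p : Int))).foldl (fun c p => c.modify p 0 (· + 1)) c := by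
  induction n using Nat.strong_induction_on with
  | _ n ih =>
    intro c
    by_cases h2 : 2 ≤ n
    · rw [pfLoop]
      rw [if_pos (by exact_mod_cast by omega : (1:Int) < (n : Int))]
      split
      next i hfi =>
        rw [pfFind_eq n h2] at hfi
        injection hfi with hfi
        subst hfi
        rw [PySem.Int.floordiv_natCast]
        have hlt : n / n.minFac < n :=
          Nat.div_lt_self (by omega) (Nat.minFac_prime (by omega)).one_lt
        have hge : 1 ≤ n / n.minFac :=
          Nat.div_pos (Nat.minFac_le (by omega)) (Nat.minFac_pos n)
        obtain ⟨k, rfl⟩ : ∃ k, n = k + 2 := ⟨n - 2, by omega⟩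
        rw [Nat.primeFactorsList]
        simp only [List.map_cons, List.foldl_cons]
        exact ih _ hlt hge _
      next hfi =>
        rw [pfFind_eq n h2] at hfi
        cases hfi
    · have h1 : n = 1 := by omega
      subst h1
      rw [pfLoop, if_neg (by norm_num), Nat.primeFactorsList_one]
      simp

theorem primeFactors_eq (n : Nat) (h : 1 ≤ n) :
    primeFactors (n : Int) = PySem.Dict.counter (n.primeFactorsList.map (fun (p : Nat) => (p : Int))) := by
  rw [PySem.Dict.counter_eq_foldl, primeFactors, pfLoop_eq n h]

theorem merge_inner_eq (l : List (Int × Int)) (c : PySem.Dict Int Int) :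
    l.foldl (fun c kv => if c.contains kv.1 then c.modify kv.1 0 (· + kv.2)
        else c.insert kv.1 kv.2) c
      = l.foldl (fun c kv => c.modify kv.1 0 (· + kv.2)) c := by
  induction l generalizing c with
  | nil => rfl
  | cons kv tl ih =>
    simp only [List.foldl_cons]
    by_cases hc : c.contains kv.1
    · rw [if_pos hc, ih]
    · rw [if_neg hc, ih]
      congr 1
      rw [PySem.Dict.modify, PySem.Dict.getD_of_not_contains c 0 (by simpa using hc), zero_add]

theorem getD_merge_fold (l : List (Int × Int)) (d : PySem.Dict Int Int) (x : Int) :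
    (l.foldl (fun c kv => c.modify kv.1 0 (· + kv.2)) d).getD x 0
      = d.getD x 0 + ((l.filter (fun kv => kv.1 == x)).map (·.2)).sum := by
  induction l generalizing d with
  | nil => simp
  | cons kv tl ih =>
    simp only [List.foldl_cons, List.filter_cons]
    rw [ih]
    by_cases hx : kv.1 = x
    · subst hx
      rw [if_pos (by simp), PySem.Dict.getD_modify, if_pos rfl]
      simp only [List.map_cons, List.sum_cons]
      ring
    · rw [if_neg (by simp [hx]), PySem.Dict.getD_modify, if_neg (Ne.symm hx)]

theorem filter_map_pair_sum (K : List Int) (hK : K.Nodup) (f : Int → Int) (x : Int) :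
    (((K.map (fun k => (k, f k))).filter (fun kv => kv.1 == x)).map (·.2)).sum
      = if x ∈ K then f x else 0 := by
  induction K with
  | nil => simp
  | cons k tl ih =>
    have hk : k ∉ tl := (List.nodup_cons.mp hK).1
    have htl := (List.nodup_cons.mp hK).2
    simp only [List.map_cons, List.filter_cons]
    by_cases hx : k = x
    · subst hx
      rw [if_pos (by simp)]
      simp only [List.map_cons, List.sum_cons, ih htl]
      rw [if_neg hk, if_pos (by simp), add_zero]
    · rw [if_neg (by simp [hx]), ih htl]
      by_cases hm : x ∈ tl
      · rw [if_pos hm, if_pos (List.mem_cons_of_mem _ hm)]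
      · rw [if_neg hm, if_neg (by
          simp only [List.mem_cons, hm, or_false]
          exact fun hh => hx hh.symm)]

theorem counter_filtered_sum (xs : List Int) (x : Int) :
    (((PySem.Dict.counter xs).items.filter (fun kv => kv.1 == x)).map (·.2)).sum
      = (xs.count x : Int) := by
  rw [PySem.Dict.items_counter, filter_map_pair_sum _ (PySem.Set.nodup_ofList xs)]
  by_cases hm : x ∈ xs
  · rw [if_pos ((PySem.Set.mem_ofList xs x).mpr hm)]
  · rw [if_neg (fun hh => hm ((PySem.Set.mem_ofList xs x).mp hh))]
    rw [List.count_eq_zero_of_not_mem hm]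
    rfl

theorem factrials_getD (N : Int) (x : Int) :
    (factrials N).getD x 0
      = (((ints2 N.toNat).map
          (fun i => (i.primeFactorsList.map (fun (p : Nat) => (p : Int))).count x)).sum : Int) := by
  rw [factrials, pyRange_two_cast]
  have key : ∀ (l : List Nat) (d : PySem.Dict Int Int), (∀ i ∈ l, 1 ≤ i) →
      ((l.map (fun (i : Nat) => (i : Int))).foldl (fun c i =>
        (primeFactors i).items.foldl (fun c kv =>
          if c.contains kv.1 then c.modify kv.1 0 (· + kv.2) else c.insert kv.1 kv.2) c) d).getD x 0
      = d.getD x 0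
        + ((l.map (fun i => (i.primeFactorsList.map (fun (p : Nat) => (p : Int))).count x)).sum : Int) := by
    intro l
    induction l with
    | nil => intro d _; simp
    | cons i tl ih =>
      intro d hmem
      simp only [List.map_cons, List.foldl_cons, List.sum_cons]
      rw [ih _ (fun j hj => hmem j (List.mem_cons_of_mem _ hj))]
      rw [merge_inner_eq, getD_merge_fold]
      rw [primeFactors_eq i (hmem i (by simp)), counter_filtered_sum]
      ring
  rw [key _ _ (fun i hi => by have := mem_ints2.mp hi; omega)]
  simp

theorem factrials_keys_nodup (N : Int) : (factrials N).keys.Nodup := by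
  rw [factrials]
  have key : ∀ (l : List Int) (d : PySem.Dict Int Int), d.keys.Nodup →
      (l.foldl (fun c i =>
        (primeFactors i).items.foldl (fun c kv =>
          if c.contains kv.1 then c.modify kv.1 0 (· + kv.2) else c.insert kv.1 kv.2) c) d).keys.Nodup := by
    intro l
    induction l with
    | nil => intro d hd; exact hd
    | cons i tl ih =>
      intro d hd
      simp only [List.foldl_cons]
      refine ih _ ?_
      rw [merge_inner_eq]
      exact PySem.Dict.nodup_keys_foldl_modify_key (primeFactors i).items
        (fun kv : Int × Int => kv.1) 0 (fun c kv v => v + kv.2) d hd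
  exact key _ _ (by simp [PySem.Dict.keys_empty])

theorem mem_factrials_keys (N : Int) (x : Int) :
    x ∈ (factrials N).keys ↔ ∃ p : Nat, x = (p : Int) ∧ p.Prime ∧ p ≤ N.toNat := by
  rw [factrials, pyRange_two_cast]
  have key : ∀ (l : List Int) (d : PySem.Dict Int Int),
      (x ∈ (l.foldl (fun c i =>
        (primeFactors i).items.foldl (fun c kv =>
          if c.contains kv.1 then c.modify kv.1 0 (· + kv.2) else c.insert kv.1 kv.2) c) d).keys
       ↔ x ∈ d.keys ∨ ∃ i ∈ l, x ∈ (primeFactors i).items.map (·.1)) := by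
    intro l
    induction l with
    | nil => intro d; simp
    | cons i tl ih =>
      intro d
      simp only [List.foldl_cons]
      rw [ih]
      rw [merge_inner_eq, PySem.Dict.keys_foldl_modify_key (primeFactors i).items
        (fun kv : Int × Int => kv.1) 0 (fun c kv v => v + kv.2) d]
      rw [PySem.Set.mem_update]
      simp only [List.mem_cons]
      constructor
      · rintro (( h | h) | ⟨j, hj, hx⟩)
        · exact Or.inl h
        · exact Or.inr ⟨i, Or.inl rfl, h⟩
        · exact Or.inr ⟨j, Or.inr hj, hx⟩
      · rintro (h | ⟨j, (rfl | hj), hx⟩)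
        · exact Or.inl (Or.inl h)
        · exact Or.inl (Or.inr hx)
        · exact Or.inr ⟨j, hj, hx⟩
  have hconv : ∀ (dd : PySem.Dict Int Int), List.map (fun y : Int × Int => y.1) dd.items = dd.keys :=
    fun dd => rfl
  rw [key]
  simp only [PySem.Dict.keys_empty, List.not_mem_nil, false_or]
  constructor
  · rintro ⟨ii, hii, hx⟩
    obtain ⟨i, hi, rfl⟩ := List.mem_map.mp hii
    obtain ⟨h2, hM⟩ := mem_ints2.mp hi
    rw [hconv, primeFactors_eq i (by omega), PySem.Dict.keys_counter, PySem.Set.mem_ofList] at hx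
    obtain ⟨p, hp, rfl⟩ := List.mem_map.mp hx
    have hpp := Nat.prime_of_mem_primeFactorsList hp
    have hdvd := ((Nat.mem_primeFactorsList (by omega : i ≠ 0)).mp hp).2
    exact ⟨p, rfl, hpp, le_trans (Nat.le_of_dvd (by omega) hdvd) hM⟩
  · rintro ⟨p, rfl, hp, hpM⟩
    refine ⟨(p : Int), List.mem_map.mpr ⟨p, mem_ints2.mpr ⟨hp.two_le, hpM⟩, rfl⟩, ?_⟩
    rw [hconv, primeFactors_eq p (by have := hp.two_le; omega), PySem.Dict.keys_counter,
      PySem.Set.mem_ofList, Nat.primeFactorsList_prime hp]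
    simp

theorem sum_count_eq_Fv (M p : Nat) (hp : p.Prime) :
    ((ints2 M).map (fun i => i.primeFactorsList.count p)).sum = Fv M p := by
  induction M with
  | zero => simp [ints2, Fv]
  | succ M ihM =>
    by_cases hM : 1 ≤ M
    · rw [ints2_succ hM, List.map_append, List.sum_append, ihM]
      simp only [List.map_cons, List.map_nil, List.sum_cons, List.sum_nil, add_zero]
      rw [Fv, Fv, Nat.factorial_succ, Nat.factorization_mul (by omega) (Nat.factorial_ne_zero M)]
      simp only [Finsupp.coe_add, Pi.add_apply, Nat.primeFactorsList_count_eq]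
      omega
    · have h0 : M = 0 := by omega
      subst h0
      simp [ints2, Fv]

theorem sum_map_natcast (l : List Nat) (g : Nat → Nat) :
    (l.map (fun i => ((g i : Nat) : Int))).sum = (((l.map g).sum : Nat) : Int) := by
  induction l with
  | nil => simp
  | cons a tl ih =>
    simp only [List.map_cons, List.sum_cons, ih]
    push_cast
    ring

theorem overt_length (N : Int) (t : Nat) :
    ((((factrials N).items.filter (fun kv => (t : Int) ≤ kv.2)).map (·.1)).length) = ct N.toNat t := by
  have hnd2 : (((ints2 N.toNat).filter (fun p => decide p.Prime)).map
      (fun (p : Nat) => (p : Int))).Nodup :=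
    (((nodup_ints2 N.toNat).filter _).map (fun a b h => by exact_mod_cast h))
  have hperm : (factrials N).keys.Perm
      (((ints2 N.toNat).filter (fun p => decide p.Prime)).map (fun (p : Nat) => (p : Int))) := by
    rw [List.perm_ext_iff_of_nodup (factrials_keys_nodup N) hnd2]
    intro a
    rw [mem_factrials_keys]
    simp only [List.mem_map, List.mem_filter, mem_ints2, decide_eq_true_eq]
    constructor
    · rintro ⟨p, rfl, hp, hpM⟩; exact ⟨p, ⟨⟨hp.two_le, hpM⟩, hp⟩, rfl⟩
    · rintro ⟨p, ⟨⟨h2, hM⟩, hp⟩, rfl⟩; exact ⟨p, rfl, hp, hM⟩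
  rw [List.length_map, ← List.countP_eq_length_filter]
  rw [PySem.Dict.items_eq_map_keys _ (factrials_keys_nodup N) 0]
  rw [List.countP_map]
  rw [hperm.countP_eq, List.countP_map, List.countP_filter, ct]
  apply List.countP_congr
  intro p hp
  have hmem := mem_ints2.mp hp
  simp only [Function.comp_apply, Bool.and_eq_true, decide_eq_true_eq]
  constructor
  · rintro ⟨h1, h2⟩
    refine ⟨h2, ?_⟩
    rw [factrials_getD] at h1
    rw [List.map_congr_left (fun i _ => by
      rw [List.count_map_of_injective i.primeFactorsList (fun (q : Nat) => (q : Int))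
        (fun a b hh => Nat.cast_injective hh) p])] at h1
    rw [sum_map_natcast _ (fun i => List.count p i.primeFactorsList),
      sum_count_eq_Fv N.toNat p h2] at h1
    exact_mod_cast h1
  · rintro ⟨h2, h1⟩
    refine ⟨?_, h2⟩
    rw [factrials_getD]
    rw [List.map_congr_left (fun i _ => by
      rw [List.count_map_of_injective i.primeFactorsList (fun (q : Nat) => (q : Int))
        (fun a b hh => Nat.cast_injective hh) p])]
    rw [sum_map_natcast _ (fun i => List.count p i.primeFactorsList),
      sum_count_eq_Fv N.toNat p h2]
    exact_mod_cast h1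

theorem trialLoop_iff (fuel q p : Nat) (hq : 2 ≤ q) (hf : p < fuel + q) :
    (trialLoop fuel (q : Int) (p : Int) = true ↔ ∃ m, q ≤ m ∧ m * m ≤ p ∧ m ∣ p) := by
  induction fuel generalizing q with
  | zero =>
    simp only [trialLoop, Bool.false_eq_true, false_iff]
    rintro ⟨m, h1, h2, h3⟩
    have hm : m ≤ m * m := Nat.le_mul_of_pos_left m (by omega)
    omega
  | succ fuel ih =>
    simp only [trialLoop]
    by_cases hqq : (q : Int) * q ≤ (p : Int)
    · have hqqn : q * q ≤ p := by exact_mod_cast hqq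
      rw [if_pos hqq]
      by_cases hdvd : q ∣ p
      · obtain ⟨k, hk⟩ := hdvd
        have h0 : p % q = 0 := by nth_rewrite 1 [hk]; exact Nat.mul_mod_right _ _
        rw [PySem.Int.mod_natCast, h0, if_pos (by simp)]
        exact iff_of_true rfl ⟨q, le_rfl, hqqn, ⟨k, hk⟩⟩
      · have hmod : p % q ≠ 0 := fun h0 => hdvd (Nat.dvd_of_mod_eq_zero h0)
        rw [PySem.Int.mod_natCast, if_neg (by
          simp only [beq_iff_eq]
          exact fun hh => hmod (by exact_mod_cast hh))]
        rw [show ((q : Int) + 1) = ((q + 1 : Nat) : Int) by push_cast; ring]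
        rw [ih (q + 1) (by omega) (by omega)]
        constructor
        · rintro ⟨m, h1, h2, h3⟩; exact ⟨m, by omega, h2, h3⟩
        · rintro ⟨m, h1, h2, h3⟩
          have : m ≠ q := fun hh => hdvd (hh ▸ h3)
          exact ⟨m, by omega, h2, h3⟩
    · rw [if_neg hqq]
      simp only [Bool.false_eq_true, false_iff]
      rintro ⟨m, h1, h2, h3⟩
      have : ¬ (q * q ≤ p) := fun hh => hqq (by exact_mod_cast hh)
      have hmm : q * q ≤ m * m := Nat.mul_le_mul h1 h1
      omega

theorem trialLoop_prime (p : Nat) (hp2 : 2 ≤ p) :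
    (trialLoop ((p : Int)).toNat 2 (p : Int) = true ↔ ¬ p.Prime) := by
  rw [Int.toNat_natCast]
  have h := trialLoop_iff p 2 p le_rfl (by omega)
  simp only [Nat.cast_ofNat] at h
  rw [h]
  constructor
  · rintro ⟨m, hm2, hmm, hmdvd⟩ hp
    exact (Nat.prime_def_le_sqrt.mp hp).2 m hm2 (Nat.le_sqrt.mpr hmm) hmdvd
  · intro hnp
    by_contra h'
    push_neg at h'
    exact hnp (Nat.prime_def_le_sqrt.mpr ⟨hp2, fun m hm2 hms hdvd =>
      by have := h' m hm2 (Nat.le_sqrt.mp hms); exact this hdvd⟩)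

theorem legLoop_eq (p M : Nat) (hp : 2 ≤ p) (hM : 1 ≤ M) :
    ∀ fuel j e, 1 ≤ j → Nat.log p M < fuel + j →
    legLoop fuel (p : Int) (M : Int) ((p ^ j : Nat) : Int) e
      = e + ((∑ i ∈ Finset.Ico j (Nat.log p M + 1), M / p ^ i : Nat) : Int) := by
  intro fuel
  induction fuel with
  | zero =>
    intro j e hj hlog
    rw [Finset.Ico_eq_empty (by omega)]
    simp [legLoop]
  | succ fuel ih =>
    intro j e hj hlog
    simp only [legLoop]
    by_cases hq : p ^ j ≤ M
    · rw [if_pos (by exact_mod_cast hq)]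
      have hjlog : j ≤ Nat.log p M := (Nat.le_log_iff_pow_le (by omega) (by omega)).mpr hq
      rw [PySem.Int.floordiv_natCast]
      rw [show ((p ^ j : Nat) : Int) * (p : Int) = ((p ^ (j + 1) : Nat) : Int) by
        push_cast [pow_succ]; ring]
      rw [ih (j + 1) _ (by omega) (by omega)]
      rw [Finset.sum_eq_sum_Ico_succ_bot (by omega : j < Nat.log p M + 1)]
      push_cast
      ring
    · rw [if_neg (by exact_mod_cast hq)]
      have : Nat.log p M < j := by
        by_contra h'
        push_neg at h'
        exact hq ((Nat.le_log_iff_pow_le (by omega) (by omega)).mp h')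
      rw [Finset.Ico_eq_empty (by omega)]
      simp

theorem legLoop_Fv (p M : Nat) (hp : p.Prime) (hpM : p ≤ M) :
    legLoop M (p : Int) (M : Int) (p : Int) 0 = ((Fv M p : Nat) : Int) := by
  have h2 := hp.two_le
  have hpow : ((p ^ 1 : Nat) : Int) = (p : Int) := by rw [pow_one]
  nth_rewrite 2 [← hpow]
  rw [legLoop_eq p M h2 (by omega) M 1 0 (by omega) (by have := Nat.log_le_self p M; omega)]
  rw [Fv, Nat.factorization_factorial hp (Nat.lt_succ_self _)]
  ring

set_option maxHeartbeats 1000000 in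
theorem fold_counts (N : Int) (l : List Int) (st : Int × Int × Int × Int × Int) :
    l.foldl (fun st p =>
      if trialLoop p.toNat 2 p then st
      else
        let e := legLoop N.toNat p N p 0
        (st.1 + (if 2 ≤ e then 1 else 0),
         st.2.1 + (if 4 ≤ e then 1 else 0),
         st.2.2.1 + (if 14 ≤ e then 1 else 0),
         st.2.2.2.1 + (if 24 ≤ e then 1 else 0),
         st.2.2.2.2 + (if 74 ≤ e then 1 else 0))) st
    = (st.1 + (l.countP (fun p => !trialLoop p.toNat 2 p && decide ((2:Int) ≤ legLoop N.toNat p N p 0)) : Nat),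
       st.2.1 + (l.countP (fun p => !trialLoop p.toNat 2 p && decide ((4:Int) ≤ legLoop N.toNat p N p 0)) : Nat),
       st.2.2.1 + (l.countP (fun p => !trialLoop p.toNat 2 p && decide ((14:Int) ≤ legLoop N.toNat p N p 0)) : Nat),
       st.2.2.2.1 + (l.countP (fun p => !trialLoop p.toNat 2 p && decide ((24:Int) ≤ legLoop N.toNat p N p 0)) : Nat),
       st.2.2.2.2 + (l.countP (fun p => !trialLoop p.toNat 2 p && decide ((74:Int) ≤ legLoop N.toNat p N p 0)) : Nat)) := by
  induction l generalizing st with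
  | nil => simp
  | cons a tl ih =>
    simp only [List.foldl_cons, List.countP_cons]
    cases htl : trialLoop a.toNat 2 a with
    | true =>
      rw [if_pos rfl, ih]
      simp
    | false =>
      rw [if_neg (by simp), ih]
      simp only [Bool.not_false, Bool.true_and, Prod.mk.injEq]
      refine ⟨?_, ?_, ?_, ?_, ?_⟩
      · by_cases h : (2:Int) ≤ legLoop N.toNat a N a 0 <;> simp [h] <;> push_cast <;> ring
      · by_cases h : (4:Int) ≤ legLoop N.toNat a N a 0 <;> simp [h] <;> push_cast <;> ring
      · by_cases h : (14:Int) ≤ legLoop N.toNat a N a 0 <;> simp [h] <;> push_cast <;> ring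
      · by_cases h : (24:Int) ≤ legLoop N.toNat a N a 0 <;> simp [h] <;> push_cast <;> ring
      · by_cases h : (74:Int) ≤ legLoop N.toNat a N a 0 <;> simp [h] <;> push_cast <;> ring

theorem countP_B (N : Int) (t : Nat) :
    ((ints2 N.toNat).map (fun (i : Nat) => (i : Int))).countP
        (fun p => !trialLoop p.toNat 2 p && decide ((t : Int) ≤ legLoop N.toNat p N p 0))
      = ct N.toNat t := by
  rw [List.countP_map, ct]
  apply List.countP_congr
  intro i hi
  obtain ⟨h2, hM⟩ := mem_ints2.mp hi
  have hN : N = ((N.toNat : Nat) : Int) := by omega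
  simp only [Function.comp_apply, Int.toNat_natCast]
  by_cases hp : i.Prime
  · have htl : trialLoop i 2 ((i : Nat) : Int) = false := by
      have hne : ¬ (trialLoop i 2 ((i : Nat) : Int) = true) := by
        rw [← Int.toNat_natCast (n := i)]
        exact fun hh => (trialLoop_prime i h2).mp (by rwa [Int.toNat_natCast] at hh) hp
      simpa using hne
    rw [hN, Int.toNat_natCast]
    rw [legLoop_Fv i N.toNat hp (by omega)]
    simp [htl, hp, Nat.cast_le]
  · have htl : trialLoop i 2 ((i : Nat) : Int) = true := by
      have := (trialLoop_prime i h2).mpr hp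
      rwa [Int.toNat_natCast] at this
    simp [htl, hp]

theorem solve_alt_eq (N : Int) :
    solve_alt N = PySem.Int.floordiv ((ct N.toNat 4 : Int) * ((ct N.toNat 4 : Int) - 1)) 2
        * ((ct N.toNat 2 : Int) - 2)
      + (ct N.toNat 14 : Int) * ((ct N.toNat 4 : Int) - 1)
      + (ct N.toNat 24 : Int) * ((ct N.toNat 2 : Int) - 1) + (ct N.toNat 74 : Int) := by
  have hc2 := countP_B N 2
  have hc4 := countP_B N 4
  have hc14 := countP_B N 14
  have hc24 := countP_B N 24
  have hc74 := countP_B N 74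
  simp only [Nat.cast_ofNat] at hc2 hc4 hc14 hc24 hc74
  simp only [solve_alt]
  rw [pyRange_two_cast, fold_counts]
  simp only [zero_add]
  rw [hc2, hc4, hc14, hc24, hc74]

theorem sum_map_add_nat {β : Type} (l : List β) (f g : β → Nat) :
    (l.map (fun x => f x + g x)).sum = (l.map f).sum + (l.map g).sum := by
  induction l with
  | nil => simp
  | cons x tl ih => simp only [List.map_cons, List.sum_cons, ih]; omega

theorem sum_map_ite_nat {β : Type} (l : List β) (p : β → Bool) :
    (l.map (fun x => if p x then 1 else 0)).sum = l.countP p := by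
  induction l with
  | nil => simp
  | cons x tl ih =>
    simp only [List.map_cons, List.sum_cons, List.countP_cons, ih]
    by_cases h : p x <;> simp [h] <;> omega

theorem sum_countP_swap {α β : Type} (l1 : List α) (l2 : List β) (q : α → β → Bool) :
    (l1.map (fun a => l2.countP (q a))).sum = (l2.map (fun b => l1.countP (fun a => q a b))).sum := by
  induction l1 with
  | nil => simp
  | cons a l1 ih =>
    simp only [List.map_cons, List.sum_cons, List.countP_cons, ih]
    rw [sum_map_add_nat l2 (fun b => l1.countP (fun a => q a b)) (fun b => if q a b then 1 else 0),
      sum_map_ite_nat l2 (q a)]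
    omega

theorem countP_two (l : List Int) (x y : Int) (hxy : x ≠ y) :
    l.countP (fun d => d == x || d == y) = l.count x + l.count y := by
  induction l with
  | nil => simp
  | cons a tl ih =>
    simp only [List.countP_cons, List.count_cons, ih]
    by_cases hx : a = x
    · by_cases hy : a = y
      · exact absurd (hx ▸ hy) hxy
      · simp [hx, hy, hxy, Ne.symm hxy]
        omega
    · by_cases hy : a = y
      · simp [hx, hy, hxy, Ne.symm hxy]
        omega
      · simp [hx, hy]

theorem length_combinations {α : Type} (xs : List α) (r : Nat) :
    (PySem.List.combinations xs r).length = xs.length.choose r := by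
  induction xs generalizing r with
  | nil =>
    cases r with
    | zero => simp [PySem.List.combinations_zero]
    | succ r => simp [PySem.List.combinations_nil_succ]
  | cons x xs ih =>
    cases r with
    | zero => simp [PySem.List.combinations_zero]
    | succ r =>
      rw [PySem.List.combinations_cons_succ, List.length_append, List.length_map, ih, ih]
      simp [Nat.choose_succ_succ]

theorem countP_ne_of_nodup (l : List Int) (hl : l.Nodup) (d : Int) (hd : d ∈ l) :
    l.countP (fun x => decide (d ≠ x)) = l.length - 1 := by
  have h1 : l.countP (fun x => decide (d ≠ x)) = l.countP (fun x => !(x == d)) :=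
    List.countP_congr (fun x _ => by
      by_cases hxd : x = d
      · subst hxd; simp
      · simp [hxd, Ne.symm hxd])
  have h2 := List.length_eq_countP_add_countP (p := fun x : Int => x == d) (l := l)
  have h3 : l.countP (fun x : Int => x == d) = 1 := by
    have hc := List.count_eq_one_of_mem hl hd
    rwa [List.count] at hc
  have h4 : l.countP (fun a : Int => decide ¬((a == d) = true)) = l.countP (fun x => !(x == d)) :=
    List.countP_congr (fun x _ => by by_cases hxd : x = d <;> simp [hxd])
  omega

theorem pairs_length (lo hi : List Int) (hhi : hi.Nodup) (hsub : ∀ x ∈ lo, x ∈ hi) :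
    (lo.flatMap (fun d => (hi.filter (fun x => d ≠ x)).map (fun x => (d, x)))).length
      = lo.length * (hi.length - 1) := by
  rw [List.length_flatMap,
    List.map_congr_left (fun d hd => by
      rw [List.length_map, ← List.countP_eq_length_filter,
        countP_ne_of_nodup hi hhi d (hsub d hd)]),
    PySem.List.sum_map_const_nat]

theorem s1_length (over2 over4 : List Int) (h2 : over2.Nodup) (hsub : over4.Sublist over2) :
    (over2.flatMap (fun d =>
        ((PySem.List.combinations over4 2).filter (fun d4 => !d4.contains d)).map
          (fun d4 => (d, d4)))).length
      = over4.length.choose 2 * (over2.length - 2) := by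
  have hnd4 : over4.Nodup := h2.sublist hsub
  rw [List.length_flatMap,
    List.map_congr_left (fun d hd => by
      rw [List.length_map, ← List.countP_eq_length_filter])]
  rw [sum_countP_swap over2 (PySem.List.combinations over4 2) (fun d c => !c.contains d)]
  rw [List.map_congr_left (g := fun _ => over2.length - 2) (fun c hc => by
    obtain ⟨hsl, hlen⟩ := (PySem.List.mem_combinations_iff _ _ _).mp hc
    match c, hlen with
    | [x, y], _ =>
      have hcnd : [x, y].Nodup := hnd4.sublist hsl
      have hxy : x ≠ y := by simpa using hcnd
      have hx : x ∈ over2 := (hsl.trans hsub).subset (by simp)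
      have hy : y ∈ over2 := (hsl.trans hsub).subset (by simp)
      have hcg : over2.countP (fun a => [x, y].contains a) = over2.countP (fun d => d == x || d == y) :=
        List.countP_congr (fun a _ => by simp)
      have hcnt := countP_two over2 x y hxy
      have hlen2 := List.length_eq_countP_add_countP (p := fun a : Int => [x, y].contains a) (l := over2)
      have hng : over2.countP (fun a : Int => decide ¬(([x, y].contains a) = true))
          = over2.countP (fun d => !([x, y].contains d)) :=
        List.countP_congr (fun a _ => by by_cases hm : a ∈ [x, y] <;> simp [hm])
      have hcx := List.count_eq_one_of_mem h2 hx
      have hcy := List.count_eq_one_of_mem h2 hy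
      simp only [] at hlen2 ⊢
      show over2.countP (fun a => !([x, y].contains a)) = over2.length - 2
      omega)]
  rw [PySem.List.sum_map_const_nat, length_combinations]

theorem final_arith (a2 a4 a14 a24 a74 : Nat) (h42 : a4 ≤ a2) (h144 : a14 ≤ a4) (h242 : a24 ≤ a2) :
    ((a4.choose 2 * (a2 - 2) : Nat) : Int) + ((a14 * (a4 - 1) : Nat) : Int)
        + ((a24 * (a2 - 1) : Nat) : Int) + (a74 : Int)
      = PySem.Int.floordiv ((a4 : Int) * ((a4 : Int) - 1)) 2 * ((a2 : Int) - 2)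
        + (a14 : Int) * ((a4 : Int) - 1) + (a24 : Int) * ((a2 : Int) - 1) + (a74 : Int) := by
  have h1 : PySem.Int.floordiv ((a4 : Int) * ((a4 : Int) - 1)) 2 = (a4.choose 2 : Int) := by
    rcases Nat.eq_zero_or_pos a4 with h | h
    · subst h
      rw [PySem.Int.floordiv_eq_ediv_of_pos (by norm_num)]
      norm_num [show Nat.choose 0 2 = 0 from rfl]
    · rw [show (a4 : Int) * ((a4 : Int) - 1) = ((a4 * (a4 - 1) : Nat) : Int) by
        rw [Nat.cast_mul, Nat.cast_sub (by omega)]; push_cast; ring]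
      rw [PySem.Int.floordiv_eq_ediv_of_pos (by norm_num), Nat.choose_two_right]
      omega
  have e1 : ((a4.choose 2 * (a2 - 2) : Nat) : Int) = (a4.choose 2 : Int) * ((a2 : Int) - 2) := by
    rcases Nat.eq_zero_or_pos (a4.choose 2) with h | h
    · simp [h]
    · have ha4 : 2 ≤ a4 := by
        rcases Nat.lt_or_ge a4 2 with hlt | hge
        · rw [Nat.choose_eq_zero_of_lt hlt] at h
          omega
        · exact hge
      have ha2 : 2 ≤ a2 := le_trans ha4 h42
      rw [Nat.cast_mul, Nat.cast_sub ha2]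
      push_cast
      ring
  have e2 : ((a14 * (a4 - 1) : Nat) : Int) = (a14 : Int) * ((a4 : Int) - 1) := by
    rcases Nat.eq_zero_or_pos a14 with h | h
    · simp [h]
    · have ha4 : 1 ≤ a4 := le_trans h h144
      rw [Nat.cast_mul, Nat.cast_sub ha4]
      push_cast
      ring
  have e3 : ((a24 * (a2 - 1) : Nat) : Int) = (a24 : Int) * ((a2 : Int) - 1) := by
    rcases Nat.eq_zero_or_pos a24 with h | h
    · simp [h]
    · have ha2 : 1 ≤ a2 := le_trans h h242
      rw [Nat.cast_mul, Nat.cast_sub ha2]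
      push_cast
      ring
  rw [e1, e2, e3, h1]

theorem solve_eq (N : Int) :
    solve N = ((ct N.toNat 4).choose 2 * (ct N.toNat 2 - 2) : Nat)
      + ((ct N.toNat 14 * (ct N.toNat 4 - 1) : Nat) : Int)
      + ((ct N.toNat 24 * (ct N.toNat 2 - 1) : Nat) : Int) + (ct N.toNat 74 : Int) := by
  have hsubt : ∀ (s t : Int), s ≤ t →
      ((factrials N).items.filter (fun kv => t ≤ kv.2)).Sublist
        ((factrials N).items.filter (fun kv => s ≤ kv.2)) := by
    intro s t hst
    have heq : (factrials N).items.filter (fun kv => decide (t ≤ kv.2))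
        = ((factrials N).items.filter (fun kv => decide (s ≤ kv.2))).filter
            (fun kv => decide (t ≤ kv.2)) := by
      rw [List.filter_filter]
      apply List.filter_congr
      intro kv _
      by_cases ht : t ≤ kv.2
      · simp [ht, le_trans hst ht]
      · simp [ht]
    exact heq ▸ List.filter_sublist
  have hnod : ∀ (t : Int), (((factrials N).items.filter (fun kv => t ≤ kv.2)).map
      (fun y : Int × Int => y.1)).Nodup := by
    intro t
    exact List.Sublist.nodup (List.Sublist.map _ List.filter_sublist) (factrials_keys_nodup N)
  have ho2 := overt_length N 2
  have ho4 := overt_length N 4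
  have ho14 := overt_length N 14
  have ho24 := overt_length N 24
  have ho74 := overt_length N 74
  simp only [Nat.cast_ofNat] at ho2 ho4 ho14 ho24 ho74
  simp only [solve]
  rw [s1_length _ _ (hnod 2) (List.Sublist.map _ (hsubt 2 4 (by norm_num)))]
  rw [pairs_length _ _ (hnod 4) (fun x hx =>
    (List.Sublist.map _ (hsubt 4 14 (by norm_num))).subset hx)]
  rw [pairs_length _ _ (hnod 2) (fun x hx =>
    (List.Sublist.map _ (hsubt 2 24 (by norm_num))).subset hx)]
  rw [ho2, ho4, ho14, ho24, ho74]

-- ===== VERDICT (by name: the statement is the Claim_ definition above) =====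
theorem solve_spec : Claim_equal_solve := by
  intro N _
  unfold Spec_solve
  rw [solve_eq, solve_alt_eq, final_arith]
  · unfold ct; exact List.countP_mono_left (fun x _ h => by
      simp only [Bool.and_eq_true, decide_eq_true_eq] at h ⊢; exact ⟨h.1, by omega⟩)
  · unfold ct; exact List.countP_mono_left (fun x _ h => by
      simp only [Bool.and_eq_true, decide_eq_true_eq] at h ⊢; exact ⟨h.1, by omega⟩)
  · unfold ct; exact List.countP_mono_left (fun x _ h => by
      simp only [Bool.and_eq_true, decide_eq_true_eq] at h ⊢; exact ⟨h.1, by omega⟩)
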